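-- pv_equiv track=rewrite | github.com/t7reyeslua/NILM-Loc | stats/metrics.py | jaccard2
-- ===== SOURCE A (Python) =====
-- def jaccard2(gt_combo_states, co_combo_states, loc_combo_states):
--     jaccard_co  = []
--     jaccard_loc = []
--     jaccard_co_states  = []
--     jaccard_loc_states = []
--     for i in range (0, len(gt_combo_states)):
--         gt_apps =  [app_state[0] for app_state in gt_combo_states[i]  if app_state[0] not in [7]]
--         co_apps =  [app_state[0] for app_state in co_combo_states[i]  if app_state[0] not in [7]]
--         loc_apps = [app_state[0] for app_state in loc_combo_states[i] if app_state[0] not in [7]]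
--
--         gt_u_co  = list(set(gt_apps) | set(co_apps))
--         gt_u_loc = list(set(gt_apps) | set(loc_apps))
--         gt_n_co  = list(set(gt_apps) & set(co_apps))
--         gt_n_loc = list(set(gt_apps) & set(loc_apps))
--
--         jaccard_co.append((len(gt_n_co), len(gt_u_co)))
--         jaccard_loc.append((len(gt_n_loc), len(gt_u_loc)))
--
--         gt_n_co_gt_states = []
--         for app in gt_n_co:
--             for app_state in gt_combo_states[i]:
--                 try:
--                     if app_state[0] == app:
--                         gt_n_co_gt_states.append(app_state[1])
--                 except Exception:
--                     continue
--
--         gt_n_co_co_states = []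
--         for app in gt_n_co:
--             for app_state in co_combo_states[i]:
--                 try:
--                     if app_state[0] == app:
--                         gt_n_co_co_states.append(app_state[1])
--                 except Exception:
--                     continue
--
--         gt_n_loc_gt_states = []
--         for app in gt_n_loc:
--             for app_state in gt_combo_states[i]:
--                 try:
--                     if app_state[0] == app:
--                         gt_n_loc_gt_states.append(app_state[1])
--                 except Exception:
--                     continue
--         gt_n_loc_loc_states = []
--         for app in gt_n_loc:
--             for app_state in loc_combo_states[i]:
--                 try:
--                     if app_state[0] == app:
--                         gt_n_loc_loc_states.append(app_state[1])
--                 except Exception: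
--                     continue
--
--         gt_n_co_states  = list(set(gt_n_co_gt_states) & set(gt_n_co_co_states))
--         gt_n_loc_states = list(set(gt_n_loc_gt_states) & set(gt_n_loc_loc_states))
--
--         jaccard_co_states.append((len(gt_n_co_states), len(gt_n_co)))
--         jaccard_loc_states.append((len(gt_n_loc_states), len(gt_n_loc)))
--     return jaccard_co, jaccard_loc, jaccard_co_states, jaccard_loc_states
-- ===== SOURCE B (Python) =====
-- def jaccard2(gt_combo_states, co_combo_states, loc_combo_states):
--     # One pass per row: build id-sets once and use O(1) set lookups; no inner rescans per app.
--     jaccard_co, jaccard_loc, jaccard_co_states, jaccard_loc_states = [], [], [], []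
--     for g_row, c_row, l_row in zip(gt_combo_states, co_combo_states, loc_combo_states):
--         gs = {a for a, _ in g_row if a != 7}
--         cs = {a for a, _ in c_row if a != 7}
--         ls = {a for a, _ in l_row if a != 7}
--         jaccard_co.append((len(gs & cs), len(gs | cs)))
--         jaccard_loc.append((len(gs & ls), len(gs | ls)))
--         inter_c = gs & cs
--         g_states_c = {s for a, s in g_row if a in inter_c}
--         c_states_c = {s for a, s in c_row if a in inter_c}
--         jaccard_co_states.append((len(g_states_c & c_states_c), len(inter_c)))
--         inter_l = gs & ls
--         g_states_l = {s for a, s in g_row if a in inter_l}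
--         l_states_l = {s for a, s in l_row if a in inter_l}
--         jaccard_loc_states.append((len(g_states_l & l_states_l), len(inter_l)))
--     return jaccard_co, jaccard_loc, jaccard_co_states, jaccard_loc_states
-- ===== Notes on version B (the rewrite author's own statement) =====
-- stated objective: faster
-- what changed: B zips the three lists and, per row, builds the app-id sets once and tests membership in the intersection set while scanning each row a single time, instead of A's per-app rescan of the whole row for every app in the intersection.
import Mathlib
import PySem

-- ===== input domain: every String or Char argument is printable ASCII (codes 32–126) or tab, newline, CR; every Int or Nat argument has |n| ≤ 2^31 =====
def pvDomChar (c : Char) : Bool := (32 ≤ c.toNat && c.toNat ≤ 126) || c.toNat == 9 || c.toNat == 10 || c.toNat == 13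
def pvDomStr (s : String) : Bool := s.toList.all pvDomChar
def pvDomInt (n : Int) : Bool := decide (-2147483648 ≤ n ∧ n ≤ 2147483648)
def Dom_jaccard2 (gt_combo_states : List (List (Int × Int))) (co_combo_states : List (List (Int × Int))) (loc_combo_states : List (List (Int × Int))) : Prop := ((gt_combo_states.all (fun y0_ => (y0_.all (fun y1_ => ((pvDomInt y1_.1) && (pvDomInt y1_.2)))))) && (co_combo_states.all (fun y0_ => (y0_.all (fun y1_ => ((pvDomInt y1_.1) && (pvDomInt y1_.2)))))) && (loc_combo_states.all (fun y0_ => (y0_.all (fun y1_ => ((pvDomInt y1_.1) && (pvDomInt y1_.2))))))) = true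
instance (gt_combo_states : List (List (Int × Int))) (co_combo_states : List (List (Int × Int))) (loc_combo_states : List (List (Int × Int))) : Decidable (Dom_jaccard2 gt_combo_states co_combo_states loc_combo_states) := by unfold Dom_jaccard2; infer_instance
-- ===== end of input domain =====

-- B zips the rows and builds the id-sets once per row with set-membership tests,
-- replacing A's per-app rescans of each row; equivalence is proved on the inputs where A does not raise.

-- ===== PORT A =====
-- [app_state[0] for app_state in row if app_state[0] not in [7]]
def pvAppsA (row : List (Int × Int)) : List Int :=
  (row.filter (fun p => !([(7 : Int)].contains p.1))).map Prod.fst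

-- the nested 'for app in apps: for app_state in row: if app_state[0] == app: out.append(app_state[1])'
-- (the try/except never fires on well-typed pairs)
def pvStatesA (apps : List Int) (row : List (Int × Int)) : List Int :=
  apps.foldl (fun acc app =>
    row.foldl (fun acc2 p => if p.1 == app then acc2 ++ [p.2] else acc2) acc) []

-- one iteration of A's loop body at index i: the four appended pairs
def pvBodyA (g c l : List (Int × Int)) : (Int × Int) × (Int × Int) × (Int × Int) × (Int × Int) :=
  let gt_apps := pvAppsA g
  let co_apps := pvAppsA c
  let loc_apps := pvAppsA l
  let gt_u_co := PySem.Set.union (PySem.Set.ofList gt_apps) (PySem.Set.ofList co_apps)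
  let gt_u_loc := PySem.Set.union (PySem.Set.ofList gt_apps) (PySem.Set.ofList loc_apps)
  let gt_n_co := PySem.Set.inter (PySem.Set.ofList gt_apps) (PySem.Set.ofList co_apps)
  let gt_n_loc := PySem.Set.inter (PySem.Set.ofList gt_apps) (PySem.Set.ofList loc_apps)
  let gt_n_co_states := PySem.Set.inter (PySem.Set.ofList (pvStatesA gt_n_co g)) (PySem.Set.ofList (pvStatesA gt_n_co c))
  let gt_n_loc_states := PySem.Set.inter (PySem.Set.ofList (pvStatesA gt_n_loc g)) (PySem.Set.ofList (pvStatesA gt_n_loc l))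
  (((gt_n_co.length : Int), (gt_u_co.length : Int)),
   ((gt_n_loc.length : Int), (gt_u_loc.length : Int)),
   ((gt_n_co_states.length : Int), (gt_n_co.length : Int)),
   ((gt_n_loc_states.length : Int), (gt_n_loc.length : Int)))

def jaccard2 (gt_combo_states : List (List (Int × Int))) (co_combo_states : List (List (Int × Int))) (loc_combo_states : List (List (Int × Int))) : (List (Int × Int)) × (List (Int × Int)) × (List (Int × Int)) × (List (Int × Int)) :=
  (PySem.List.pyRange 0 (gt_combo_states.length : Int) 1).foldl
    (fun st i =>
      let r := pvBodyA (PySem.List.pyGetD gt_combo_states i [])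
                       (PySem.List.pyGetD co_combo_states i [])
                       (PySem.List.pyGetD loc_combo_states i [])
      (st.1 ++ [r.1], st.2.1 ++ [r.2.1], st.2.2.1 ++ [r.2.2.1], st.2.2.2 ++ [r.2.2.2]))
    ([], [], [], [])

-- ===== PORT B =====
-- {a for a, _ in row if a != 7}
def pvIdsB (row : List (Int × Int)) : PySem.Set Int :=
  PySem.Set.ofList ((row.filter (fun p => p.1 != 7)).map Prod.fst)

-- {s for a, s in row if a in inter}
def pvStatesB (inter : PySem.Set Int) (row : List (Int × Int)) : PySem.Set Int :=
  PySem.Set.ofList ((row.filter (fun p => PySem.Set.contains inter p.1)).map Prod.snd)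

-- one iteration of B's loop body on a zipped triple of rows
def pvBodyB (g c l : List (Int × Int)) : (Int × Int) × (Int × Int) × (Int × Int) × (Int × Int) :=
  let gs := pvIdsB g
  let cs := pvIdsB c
  let ls := pvIdsB l
  let interC := PySem.Set.inter gs cs
  let interL := PySem.Set.inter gs ls
  (((interC.length : Int), ((PySem.Set.union gs cs).length : Int)),
   ((interL.length : Int), ((PySem.Set.union gs ls).length : Int)),
   (((PySem.Set.inter (pvStatesB interC g) (pvStatesB interC c)).length : Int), (interC.length : Int)),
   (((PySem.Set.inter (pvStatesB interL g) (pvStatesB interL l)).length : Int), (interL.length : Int)))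

def jaccard2_alt (gt_combo_states : List (List (Int × Int))) (co_combo_states : List (List (Int × Int))) (loc_combo_states : List (List (Int × Int))) : (List (Int × Int)) × (List (Int × Int)) × (List (Int × Int)) × (List (Int × Int)) :=
  (gt_combo_states.zip (co_combo_states.zip loc_combo_states)).foldl
    (fun st t =>
      let r := pvBodyB t.1 t.2.1 t.2.2
      (st.1 ++ [r.1], st.2.1 ++ [r.2.1], st.2.2.1 ++ [r.2.2.1], st.2.2.2 ++ [r.2.2.2]))
    ([], [], [], [])

-- ===== PRECONDITION & SPEC =====
-- A indexes co_combo_states[i] and loc_combo_states[i] for every i < len(gt_combo_states):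
-- Pre_ excludes exactly the inputs where that raises IndexError (shorter co or loc lists).
def Pre_jaccard2 (gt_combo_states : List (List (Int × Int))) (co_combo_states : List (List (Int × Int))) (loc_combo_states : List (List (Int × Int))) : Prop :=
  gt_combo_states.length ≤ co_combo_states.length ∧ gt_combo_states.length ≤ loc_combo_states.length
instance (gt_combo_states : List (List (Int × Int))) (co_combo_states : List (List (Int × Int))) (loc_combo_states : List (List (Int × Int))) : Decidable (Pre_jaccard2 gt_combo_states co_combo_states loc_combo_states) := by unfold Pre_jaccard2; infer_instance

def pvWitness_jaccard2 : (List (List (Int × Int))) × (List (List (Int × Int))) × (List (List (Int × Int))) :=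
  ([[(1, 2), (3, 0)]], [[(1, 1), (7, 0)]], [[(3, 0)]])

def Spec_jaccard2 (gt_combo_states : List (List (Int × Int))) (co_combo_states : List (List (Int × Int))) (loc_combo_states : List (List (Int × Int))) (out : (List (Int × Int)) × (List (Int × Int)) × (List (Int × Int)) × (List (Int × Int))) : Prop := out = jaccard2_alt gt_combo_states co_combo_states loc_combo_states
instance (gt_combo_states : List (List (Int × Int))) (co_combo_states : List (List (Int × Int))) (loc_combo_states : List (List (Int × Int))) (out : (List (Int × Int)) × (List (Int × Int)) × (List (Int × Int)) × (List (Int × Int))) : Decidable (Spec_jaccard2 gt_combo_states co_combo_states loc_combo_states out) := by unfold Spec_jaccard2; infer_instance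

-- ===== CLAIM (what is proved, stated in full; the proofs are below) =====
def Claim_equal_jaccard2 : Prop := ∀ (gt_combo_states : List (List (Int × Int))) (co_combo_states : List (List (Int × Int))) (loc_combo_states : List (List (Int × Int))), Dom_jaccard2 gt_combo_states co_combo_states loc_combo_states → Pre_jaccard2 gt_combo_states co_combo_states loc_combo_states → Spec_jaccard2 gt_combo_states co_combo_states loc_combo_states (jaccard2 gt_combo_states co_combo_states loc_combo_states)

-- ===== LEMMAS AND PROOFS =====

-- a fold that appends one element to each of four accumulators is four maps
theorem pvFoldlQuad {β : Type} (e : β → (Int × Int) × (Int × Int) × (Int × Int) × (Int × Int))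
    (xs : List β) (a b c d : List (Int × Int)) :
    xs.foldl (fun st x =>
        (st.1 ++ [(e x).1], st.2.1 ++ [(e x).2.1], st.2.2.1 ++ [(e x).2.2.1], st.2.2.2 ++ [(e x).2.2.2]))
      (a, b, c, d)
    = (a ++ xs.map (fun x => (e x).1), b ++ xs.map (fun x => (e x).2.1),
       c ++ xs.map (fun x => (e x).2.2.1), d ++ xs.map (fun x => (e x).2.2.2)) := by
  induction xs generalizing a b c d with
  | nil => simp
  | cons x xs ih => simp [ih]

-- indexing the three lists along range(len(gt)) is mapping over the zip (when co, loc are long enough)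
theorem pvMapIdxEqZip {γ : Type} (F : List (Int × Int) → List (Int × Int) → List (Int × Int) → γ)
    (gt co loc : List (List (Int × Int)))
    (h1 : gt.length ≤ co.length) (h2 : gt.length ≤ loc.length) :
    (PySem.List.pyRange 0 (gt.length : Int) 1).map
        (fun i => F (PySem.List.pyGetD gt i []) (PySem.List.pyGetD co i []) (PySem.List.pyGetD loc i []))
    = (gt.zip (co.zip loc)).map (fun t => F t.1 t.2.1 t.2.2) := by
  rw [PySem.List.pyRange_zero_natCast, List.map_map]
  simp only [Function.comp_def, PySem.List.pyGetD_natCast]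
  induction gt generalizing co loc with
  | nil => simp
  | cons g gt ih =>
    cases co with
    | nil => simp at h1
    | cons c co =>
      cases loc with
      | nil => simp at h2
      | cons l loc =>
        simp only [List.length_cons, List.range_succ_eq_map, List.map_cons, List.map_map,
          Function.comp_def, List.getD_cons_zero, List.getD_cons_succ, List.zip_cons_cons]
        exact congrArg _ (ih co loc (by simpa using h1) (by simpa using h2))

-- the two row-filter predicates agree
theorem pvPredEq : (fun p : Int × Int => !([(7 : Int)].contains p.1)) = (fun p : Int × Int => p.1 != 7) := by
  funext p; by_cases h : p.1 = 7 <;> simp [h, bne]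

-- membership in A's nested-loop state list
theorem pvMemStatesA (apps : List Int) (row : List (Int × Int)) (x : Int) :
    x ∈ pvStatesA apps row ↔ ∃ p ∈ row, p.1 ∈ apps ∧ x = p.2 := by
  unfold pvStatesA
  simp only [PySem.List.foldl_append_if]
  rw [PySem.List.foldl_append_eq_flatMap]
  simp only [List.nil_append, List.mem_flatMap, List.mem_map, List.mem_filter]
  constructor
  · rintro ⟨app, happ, p, ⟨hp, heq⟩, hx⟩
    exact ⟨p, hp, by simpa using (beq_iff_eq.mp heq) ▸ happ, hx.symm⟩
  · rintro ⟨p, hp, hmem, hx⟩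
    exact ⟨p.1, hmem, p, ⟨hp, by simp⟩, hx.symm⟩

-- membership in B's comprehension set
theorem pvMemStatesB (inter : PySem.Set Int) (row : List (Int × Int)) (x : Int) :
    x ∈ pvStatesB inter row ↔ ∃ p ∈ row, p.1 ∈ inter ∧ x = p.2 := by
  unfold pvStatesB
  simp only [PySem.Set.mem_ofList, List.mem_map, List.mem_filter, PySem.Set.contains_iff]
  constructor
  · rintro ⟨p, ⟨hp, hc⟩, hx⟩
    exact ⟨p, hp, by simpa [PySem.Set.contains_iff] using hc, hx.symm⟩
  · rintro ⟨p, hp, hmem, hx⟩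
    exact ⟨p, ⟨hp, by simpa [PySem.Set.contains_iff] using hmem⟩, hx.symm⟩

-- A's state list, as a set, has the same members as B's state set
theorem pvStatesAB (inter : PySem.Set Int) (r : List (Int × Int)) (x : Int) :
    x ∈ PySem.Set.ofList (pvStatesA inter r) ↔ x ∈ pvStatesB inter r := by
  rw [PySem.Set.mem_ofList, pvMemStatesA, pvMemStatesB]

-- intersections of membership-equal sets have equal size
theorem pvLenInterCongr (s1 s2 t1 t2 : PySem.Set Int)
    (hn1 : s1.Nodup) (hn2 : t1.Nodup)
    (h1 : ∀ x, x ∈ s1 ↔ x ∈ t1) (h2 : ∀ x, x ∈ s2 ↔ x ∈ t2) :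
    (PySem.Set.inter s1 s2).length = (PySem.Set.inter t1 t2).length := by
  apply List.Perm.length_eq
  rw [List.perm_ext_iff_of_nodup (PySem.Set.nodup_inter _ _ hn1) (PySem.Set.nodup_inter _ _ hn2)]
  intro a
  simp [PySem.Set.mem_inter, h1 a, h2 a]

-- A's loop body equals B's loop body on every triple of rows
theorem pvBodyEq (g c l : List (Int × Int)) : pvBodyA g c l = pvBodyB g c l := by
  have hids : ∀ r : List (Int × Int), PySem.Set.ofList (pvAppsA r) = pvIdsB r := by
    intro r; unfold pvAppsA pvIdsB; rw [pvPredEq]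
  unfold pvBodyA pvBodyB
  simp only [hids]
  have hstates : ∀ (inter : PySem.Set Int) (r1 r2 : List (Int × Int)),
      (PySem.Set.inter (PySem.Set.ofList (pvStatesA inter r1)) (PySem.Set.ofList (pvStatesA inter r2))).length
      = (PySem.Set.inter (pvStatesB inter r1) (pvStatesB inter r2)).length := by
    intro inter r1 r2
    exact pvLenInterCongr _ _ _ _ (PySem.Set.nodup_ofList _) (PySem.Set.nodup_ofList _)
      (pvStatesAB inter r1) (pvStatesAB inter r2)
  rw [hstates, hstates]

-- ===== VERDICT (by name: the statement is the Claim_ definition above) =====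
theorem jaccard2_spec : Claim_equal_jaccard2 := by
  intro gt co loc _ hpre
  unfold Spec_jaccard2 jaccard2 jaccard2_alt
  rw [pvFoldlQuad, pvFoldlQuad]
  have key : ∀ {γ : Type} (pr : ((Int × Int) × (Int × Int) × (Int × Int) × (Int × Int)) → γ),
      (PySem.List.pyRange 0 (gt.length : Int) 1).map
          (fun i => pr (pvBodyB (PySem.List.pyGetD gt i []) (PySem.List.pyGetD co i []) (PySem.List.pyGetD loc i [])))
      = (gt.zip (co.zip loc)).map (fun t => pr (pvBodyB t.1 t.2.1 t.2.2)) :=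
    fun pr => pvMapIdxEqZip (fun a b c => pr (pvBodyB a b c)) gt co loc hpre.1 hpre.2
  simp only [List.nil_append, pvBodyEq]
  exact Prod.ext (key fun r => r.1) (Prod.ext (key fun r => r.2.1)
    (Prod.ext (key fun r => r.2.2.1) (key fun r => r.2.2.2)))
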